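-- pv_equiv track=rewrite | github.com/darylloh29/fyp-sft | sft_pipeline/build_sft_dataset.py | to_prompt_completion
-- ===== SOURCE A (Python) =====
-- from typing import Any, Dict, List
--
-- def to_prompt_completion(messages: List[Dict[str, Any]]) -> Dict[str, str]:
--     prompt_parts: List[str] = []
--     completion = ""
--     for m in messages:
--         role = m.get("role")
--         content = str(m.get("content", ""))
--         if role == "assistant":
--             completion = content
--             break
--         prompt_parts.append(f"{role.upper()}: {content}")
--     return {"prompt": "\n\n".join(prompt_parts), "completion": completion}
-- ===== SOURCE B (Python) =====
-- from typing import Any, Dict, List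
--
-- def to_prompt_completion(messages: List[Dict[str, Any]]) -> Dict[str, str]:
--     idx = next((i for i, m in enumerate(messages) if m.get("role") == "assistant"),
--                len(messages))
--     prompt_parts = [f"{m.get('role').upper()}: {str(m.get('content', ''))}"
--                     for m in messages[:idx]]
--     completion = str(messages[idx].get("content", "")) if idx < len(messages) else ""
--     return {"prompt": "\n\n".join(prompt_parts), "completion": completion}
-- ===== Notes on version B (the rewrite author's own statement) =====
-- stated objective: alternative
-- what changed: Replaces A's single loop with accumulator-and-break by a boundary-index computation (first assistant message) followed by a comprehension over the prefix and a direct lookup of the completion.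
import Mathlib
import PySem

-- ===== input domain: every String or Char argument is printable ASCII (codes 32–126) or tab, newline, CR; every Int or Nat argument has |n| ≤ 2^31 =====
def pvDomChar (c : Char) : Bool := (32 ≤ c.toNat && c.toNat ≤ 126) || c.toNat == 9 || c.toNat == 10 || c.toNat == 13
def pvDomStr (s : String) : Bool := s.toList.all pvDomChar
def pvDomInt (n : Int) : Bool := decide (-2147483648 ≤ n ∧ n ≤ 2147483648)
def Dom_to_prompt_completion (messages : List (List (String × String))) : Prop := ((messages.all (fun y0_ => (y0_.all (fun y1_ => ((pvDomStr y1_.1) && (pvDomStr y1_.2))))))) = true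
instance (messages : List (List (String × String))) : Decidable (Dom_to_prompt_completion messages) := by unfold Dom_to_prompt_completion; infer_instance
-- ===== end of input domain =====

-- B restructures A's accumulate-and-break loop as: find the boundary index of the first
-- assistant message, format the prefix, and look the completion up directly (objective: alternative).
-- dict.get on the association list (first match), shared by both ports
def pvGetKey (m : List (String × String)) (k : String) : Option String :=
  (m.find? (fun p => p.1 == k)).map (·.2)

-- ===== PORT A =====
-- the for-loop: parts accumulator, completion stays "" unless the break fires
def to_prompt_completion_go (ms : List (List (String × String))) (parts : List String) :
    List String × String :=
  match ms with
  | [] => (parts, "")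
  | m :: rest =>
    let role := pvGetKey m "role"
    let content := (pvGetKey m "content").getD ""
    if role == some "assistant" then (parts, content)
    else to_prompt_completion_go rest
      (parts ++ [PySem.Str.upper (role.getD "") ++ ": " ++ content])

def to_prompt_completion (messages : List (List (String × String))) : List (String × String) :=
  let r := to_prompt_completion_go messages []
  [("prompt", PySem.Str.join "\n\n" r.1), ("completion", r.2)]

-- ===== PORT B =====
def to_prompt_completion_alt (messages : List (List (String × String))) : List (String × String) :=
  let idx := messages.findIdx (fun m => pvGetKey m "role" == some "assistant")
  let parts := (messages.take idx).map
    (fun m => PySem.Str.upper ((pvGetKey m "role").getD "") ++ ": " ++ ((pvGetKey m "content").getD ""))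
  let completion :=
    match messages[idx]? with
    | some m => (pvGetKey m "content").getD ""
    | none => ""
  [("prompt", PySem.Str.join "\n\n" parts), ("completion", completion)]

-- ===== PRECONDITION & SPEC =====
-- Pre_ excludes exactly the inputs where Python A raises AttributeError ('None'.upper()):
-- a message before the first assistant message that lacks a "role" key.
def Pre_to_prompt_completion (messages : List (List (String × String))) : Prop :=
  ((messages.takeWhile (fun m => !(pvGetKey m "role" == some "assistant"))).all
    (fun m => (pvGetKey m "role").isSome)) = true
instance (messages : List (List (String × String))) : Decidable (Pre_to_prompt_completion messages) := by
  unfold Pre_to_prompt_completion; infer_instance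

def pvWitness_to_prompt_completion : (List (List (String × String))) :=
  [[("role", "user"), ("content", "hi")], [("role", "assistant"), ("content", "yo")]]

def Spec_to_prompt_completion (messages : List (List (String × String))) (out : List (String × String)) : Prop := out = to_prompt_completion_alt messages
instance (messages : List (List (String × String))) (out : List (String × String)) : Decidable (Spec_to_prompt_completion messages out) := by unfold Spec_to_prompt_completion; infer_instance

-- ===== CLAIM (what is proved, stated in full; the proofs are below) =====
def Claim_equal_to_prompt_completion : Prop := ∀ (messages : List (List (String × String))), Dom_to_prompt_completion messages → Pre_to_prompt_completion messages → Spec_to_prompt_completion messages (to_prompt_completion messages)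

-- ===== LEMMAS AND PROOFS =====
-- the loop equals: prefix up to the first assistant message, mapped; completion looked up at the boundary
theorem to_prompt_completion_go_eq (ms : List (List (String × String))) (parts : List String) :
    to_prompt_completion_go ms parts =
      (parts ++ (ms.take (ms.findIdx (fun m => pvGetKey m "role" == some "assistant"))).map
          (fun m => PySem.Str.upper ((pvGetKey m "role").getD "") ++ ": " ++ ((pvGetKey m "content").getD "")),
        match ms[ms.findIdx (fun m => pvGetKey m "role" == some "assistant")]? with
        | some m => (pvGetKey m "content").getD ""
        | none => "") := by
  induction ms generalizing parts with
  | nil => simp [to_prompt_completion_go]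
  | cons m rest ih =>
    by_cases h : pvGetKey m "role" == some "assistant"
    · simp [to_prompt_completion_go, List.findIdx_cons, h]
    · simp only [to_prompt_completion_go, List.findIdx_cons, h, if_neg, Bool.false_eq_true,
        not_false_eq_true, cond_false, ih, List.take_succ_cons, List.getElem?_cons_succ]
      simp

-- ===== VERDICT (by name: the statement is the Claim_ definition above) =====
theorem to_prompt_completion_spec : Claim_equal_to_prompt_completion := by
  intro messages _ _
  unfold Spec_to_prompt_completion to_prompt_completion to_prompt_completion_alt
  rw [to_prompt_completion_go_eq]
  simp
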